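-- pv_equiv track=rewrite | github.com/windiff886/Affordance-Guided-Interaction | assets/robot/scripts/convert_lite_urdf_to_usd.py | remap_internal_reference_path
-- ===== SOURCE A (Python) =====
-- def remap_internal_reference_path(prim_path: str, path_map: dict[str, str]) -> str:
--     for old_prefix in sorted(path_map, key=len, reverse=True):
--         if prim_path == old_prefix:
--             return path_map[old_prefix]
--         if prim_path.startswith(f"{old_prefix}/"):
--             suffix = prim_path[len(old_prefix):]
--             return f"{path_map[old_prefix]}{suffix}"
--     return prim_path
-- ===== SOURCE B (Python) =====
-- def remap_internal_reference_path(prim_path: str, path_map: dict[str, str]) -> str: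
--     cuts = [i for i, ch in enumerate(prim_path) if ch == "/"]
--     for i in [len(prim_path)] + cuts[::-1]:
--         prefix = prim_path[:i]
--         if prefix in path_map:
--             return path_map[prefix] + prim_path[i:]
--     return prim_path
-- ===== Notes on version B (the rewrite author's own statement) =====
-- stated objective: alternative
-- what changed: Instead of sorting all map keys by length and testing each one against the path with startswith, B enumerates the '/'-cut prefixes of prim_path from longest to shortest and dict-looks each one up; cost depends on the path's depth rather than on scanning every map key.
import Mathlib
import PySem

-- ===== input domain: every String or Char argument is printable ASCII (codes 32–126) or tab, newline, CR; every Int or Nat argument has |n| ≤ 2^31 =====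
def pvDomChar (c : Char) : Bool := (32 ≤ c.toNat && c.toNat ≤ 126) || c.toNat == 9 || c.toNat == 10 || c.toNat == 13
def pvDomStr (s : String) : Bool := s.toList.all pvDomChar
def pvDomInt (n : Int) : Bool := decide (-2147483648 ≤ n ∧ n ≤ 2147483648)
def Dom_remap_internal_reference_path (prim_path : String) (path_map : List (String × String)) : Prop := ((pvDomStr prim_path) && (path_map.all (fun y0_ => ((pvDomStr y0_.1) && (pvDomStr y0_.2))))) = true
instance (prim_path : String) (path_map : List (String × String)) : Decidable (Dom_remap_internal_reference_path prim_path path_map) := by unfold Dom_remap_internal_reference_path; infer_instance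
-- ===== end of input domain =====

-- B replaces A's sort-all-keys-and-test-each scan by enumerating the '/'-cut prefixes
-- of prim_path from longest to shortest with one dict lookup each (objective: alternative).

-- dict helpers (association list; first match = the dict's unique key entry)
def pvDGet (m : List (String × String)) (k : String) : String :=
  match m with
  | [] => ""
  | (a, b) :: t => if a = k then b else pvDGet t k

def pvDHas (m : List (String × String)) (k : String) : Bool :=
  match m with
  | [] => false
  | (a, _) :: t => a == k || pvDHas t k

-- ===== PORT A =====
-- the 'for old_prefix in sorted(path_map, key=len, reverse=True)' loop
def pvGoA (prim : String) (m : List (String × String)) : List String → String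
  | [] => prim
  | k :: ks =>
    if prim = k then pvDGet m k
    else if PySem.Str.startswith prim (k ++ "/") then
      pvDGet m k ++ PySem.Str.slice prim (some (PySem.Str.len k)) none
    else pvGoA prim m ks

def remap_internal_reference_path (prim_path : String) (path_map : List (String × String)) : String :=
  pvGoA prim_path path_map
    (PySem.List.sorted (PySem.List.dedup (path_map.map Prod.fst)) (fun k => PySem.Str.len k) true)

-- ===== PORT B =====
-- the 'for i in [len(prim_path)] + cuts[::-1]' loop
def pvGoB (prim : String) (m : List (String × String)) : List Int → String
  | [] => prim
  | i :: is =>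
    if pvDHas m (PySem.Str.slice prim none (some i)) then
      pvDGet m (PySem.Str.slice prim none (some i)) ++ PySem.Str.slice prim (some i) none
    else pvGoB prim m is

def remap_internal_reference_path_alt (prim_path : String) (path_map : List (String × String)) : String :=
  let cuts := ((PySem.List.enumerate prim_path.toList 0).filter (fun p => p.2 == '/')).map (·.1)
  pvGoB prim_path path_map (PySem.Str.len prim_path :: cuts.reverse)

-- ===== PRECONDITION & SPEC =====
def Spec_remap_internal_reference_path (prim_path : String) (path_map : List (String × String)) (out : String) : Prop := out = remap_internal_reference_path_alt prim_path path_map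
instance (prim_path : String) (path_map : List (String × String)) (out : String) : Decidable (Spec_remap_internal_reference_path prim_path path_map out) := by unfold Spec_remap_internal_reference_path; infer_instance

-- ===== CLAIM (what is proved, stated in full; the proofs are below) =====
def Claim_equal_remap_internal_reference_path : Prop := ∀ (prim_path : String) (path_map : List (String × String)), Dom_remap_internal_reference_path prim_path path_map → Spec_remap_internal_reference_path prim_path path_map (remap_internal_reference_path prim_path path_map)

-- ===== LEMMAS AND PROOFS =====

-- position n is a valid cut of cs: the end of cs, or a '/' at index n
def pvValid (cs : List Char) (n : Nat) : Prop :=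
  n = cs.length ∨ (n < cs.length ∧ cs[n]? = some '/')

-- the Bool tests driving the two loops
def pvMatchA (prim k : String) : Bool :=
  prim == k || PySem.Str.startswith prim (k ++ "/")

def pvTestB (prim : String) (m : List (String × String)) (i : Int) : Bool :=
  pvDHas m (PySem.Str.slice prim none (some i))

theorem pvFind_cons {α : Type} (p : α → Bool) (a : α) (l : List α) :
    (a :: l).find? p = if p a then some a else l.find? p := by
  cases h : p a <;> simp [List.find?, h]

-- both loops are find-firsts
theorem pvGoA_eq_find (prim : String) (m : List (String × String)) (l : List String) :
    pvGoA prim m l =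
      match l.find? (pvMatchA prim) with
      | some k => if prim = k then pvDGet m k
                  else pvDGet m k ++ PySem.Str.slice prim (some (PySem.Str.len k)) none
      | none => prim := by
  induction l with
  | nil => rfl
  | cons k ks ih =>
    simp only [pvGoA, pvFind_cons, pvMatchA]
    by_cases h1 : prim = k
    · simp [h1]
    · have e : (prim == k) = false := by simp [h1]
      by_cases h2 : PySem.Chars.startswith prim.toList (k.toList ++ ['/']) = true
      · simp [e, h1, h2]
      · simp only [Bool.not_eq_true] at h2
        simp [e, h1, h2, ih]

theorem pvGoB_eq_find (prim : String) (m : List (String × String)) (l : List Int) :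
    pvGoB prim m l =
      match l.find? (pvTestB prim m) with
      | some i => pvDGet m (PySem.Str.slice prim none (some i)) ++ PySem.Str.slice prim (some i) none
      | none => prim := by
  induction l with
  | nil => rfl
  | cons i is ih =>
    simp only [pvGoB, pvFind_cons, pvTestB]
    by_cases h : pvDHas m (PySem.Str.slice prim none (some i)) = true
    · rw [if_pos h, if_pos h]
    · rw [if_neg h, if_neg h]
      exact ih

theorem pvDHas_iff (m : List (String × String)) (k : String) :
    pvDHas m k = true ↔ k ∈ m.map Prod.fst := by
  induction m with
  | nil => simp [pvDHas]
  | cons p t ih =>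
    cases p with
    | mk a b =>
      simp only [pvDHas, Bool.or_eq_true, beq_iff_eq, ih, List.map_cons, List.mem_cons]
      exact or_congr eq_comm Iff.rfl

-- find? on a strictly descending list returns the largest satisfying element
theorem pvFind_desc_max {p : Int → Bool} {l : List Int} {i : Int}
    (hpw : l.Pairwise (fun a b => b < a)) (h : l.find? p = some i) :
    ∀ j ∈ l, p j = true → j ≤ i := by
  induction l with
  | nil => simp at h
  | cons a t ih =>
    rw [List.pairwise_cons] at hpw
    rw [pvFind_cons] at h
    by_cases ha : p a = true
    · rw [if_pos ha] at h
      cases h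
      intro j hj _
      rcases List.mem_cons.mp hj with hj | hj
      · exact le_of_eq hj
      · exact le_of_lt (hpw.1 j hj)
    · rw [if_neg ha] at h
      intro j hj hpj
      rcases List.mem_cons.mp hj with hj | hj
      · subst hj; exact absurd hpj ha
      · exact ih hpw.2 h j hj hpj

-- find? on a weakly length-descending list, given a maximal match unique at its length
theorem pvFind_sorted_eq {p : String → Bool} {l : List String} {x : String}
    (hpw : l.Pairwise (fun a b => PySem.Str.len b ≤ PySem.Str.len a))
    (hx : x ∈ l) (hpx : p x = true)
    (hle : ∀ y ∈ l, p y = true → PySem.Str.len y ≤ PySem.Str.len x)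
    (huniq : ∀ y ∈ l, p y = true → PySem.Str.len y = PySem.Str.len x → y = x) :
    l.find? p = some x := by
  induction l with
  | nil => simp at hx
  | cons a t ih =>
    rw [List.pairwise_cons] at hpw
    rw [pvFind_cons]
    by_cases ha : p a = true
    · rw [if_pos ha]
      rcases List.mem_cons.mp hx with hx | hx
      · rw [hx]
      · have h1 : PySem.Str.len x ≤ PySem.Str.len a := hpw.1 x hx
        have h2 : PySem.Str.len a ≤ PySem.Str.len x := hle a List.mem_cons_self ha
        rw [huniq a List.mem_cons_self ha (le_antisymm h2 h1)]
    · rw [if_neg ha]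
      have hx' : x ∈ t := by
        rcases List.mem_cons.mp hx with hx | hx
        · subst hx; exact absurd hpx ha
        · exact hx
      exact ih hpw.2 hx' (fun y hy => hle y (List.mem_cons_of_mem _ hy))
        (fun y hy => huniq y (List.mem_cons_of_mem _ hy))

-- the list of cut indices B scans
def pvCuts (cs : List Char) : List Int :=
  ((PySem.List.enumerate cs 0).filter (fun p => p.2 == '/')).map (·.1)

theorem pvMem_cuts (cs : List Char) (j : Int) :
    j ∈ pvCuts cs ↔ ∃ n : Nat, j = (n : Int) ∧ n < cs.length ∧ cs[n]? = some '/' := by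
  simp only [pvCuts, List.mem_map, List.mem_filter, PySem.List.mem_enumerate_iff]
  constructor
  · rintro ⟨⟨a, c⟩, ⟨⟨n, hn, hpeq⟩, hc⟩, hj⟩
    cases hpeq
    refine ⟨n, by simpa using hj.symm, hn, ?_⟩
    simp only [beq_iff_eq] at hc
    rw [List.getElem?_eq_getElem hn]
    simpa using hc
  · rintro ⟨n, hj, hn, hc⟩
    refine ⟨((n : Int), '/'), ⟨⟨n, hn, ?_⟩, by simp⟩, hj.symm⟩
    rw [List.getElem?_eq_getElem hn] at hc
    simp at hc
    simp [hc]

theorem pvCuts_desc (cs : List Char) : (pvCuts cs).reverse.Pairwise (fun a b => b < a) := by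
  rw [List.pairwise_reverse]
  apply List.Pairwise.map
  · intro a b h; exact h
  · exact (PySem.List.pairwise_lt_enumerate cs 0).filter _

-- B's index list: members and descending order
theorem pvMem_I (prim : String) (i : Int) :
    i ∈ (PySem.Str.len prim :: (pvCuts prim.toList).reverse) ↔
      ∃ n : Nat, i = (n : Int) ∧ pvValid prim.toList n := by
  simp only [List.mem_cons, List.mem_reverse, pvMem_cuts, PySem.Str.len_eq, pvValid]
  constructor
  · rintro (h | ⟨n, hj, hn, hc⟩)
    · exact ⟨prim.toList.length, h, Or.inl rfl⟩
    · exact ⟨n, hj, Or.inr ⟨hn, hc⟩⟩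
  · rintro ⟨n, hj, h | ⟨hn, hc⟩⟩
    · subst h; exact Or.inl hj
    · exact Or.inr ⟨n, hj, hn, hc⟩

theorem pvI_desc (prim : String) :
    (PySem.Str.len prim :: (pvCuts prim.toList).reverse).Pairwise (fun a b => b < a) := by
  rw [List.pairwise_cons]
  refine ⟨?_, pvCuts_desc prim.toList⟩
  intro j hj
  rcases (pvMem_cuts prim.toList j).mp (List.mem_reverse.mp hj) with ⟨n, hjn, hn, _⟩
  rw [hjn, PySem.Str.len_eq]
  exact_mod_cast hn

-- the string prefix at cut n, and its characters
theorem pvPrefS_toList (prim : String) (n : Nat) :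
    (PySem.Str.slice prim none (some (n : Int))).toList = prim.toList.take n := by
  rw [PySem.Str.toList_slice, PySem.Chars.slice_eq_listSlice, PySem.List.slice_to_natCast]

theorem pvSuffS_toList (prim : String) (n : Nat) :
    (PySem.Str.slice prim (some (n : Int)) none).toList = prim.toList.drop n := by
  rw [PySem.Str.toList_slice, PySem.Chars.slice_eq_listSlice, PySem.List.slice_from_natCast]

-- A's test characterised by cut positions
theorem pvMatchA_iff (prim k : String) :
    pvMatchA prim k = true ↔
      (k.toList = prim.toList.take k.toList.length ∧ pvValid prim.toList k.toList.length) := by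
  constructor
  · intro h
    simp only [pvMatchA, Bool.or_eq_true, beq_iff_eq] at h
    rcases h with h | h
    · subst h
      simp [pvValid]
    · rw [PySem.Str.startswith_eq] at h
      have h2 : (k ++ "/").toList <+: prim.toList := (PySem.Chars.startswith_iff _ _).mp h
      have h3 : k.toList ++ ['/'] <+: prim.toList := by simpa using h2
      obtain ⟨t, ht⟩ := h3
      have hlen : prim.toList.length = k.toList.length + 1 + t.length := by
        rw [← ht]; simp; omega
      constructor
      · rw [← ht, List.take_append_of_le_length (by simp)]
        simp
      · right
        refine ⟨by omega, ?_⟩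
        rw [← ht, List.append_assoc, List.getElem?_append_right (le_refl _)]
        simp
  · rintro ⟨hk, hv | hv⟩
    · have : k.toList = prim.toList := by rw [hk, hv, List.take_length]
      have : k = prim := String.toList_inj.mp this
      simp [pvMatchA, this]
    · have hpre : k.toList ++ ['/'] <+: prim.toList := by
        have : prim.toList.take (k.toList.length + 1)
            = prim.toList.take k.toList.length ++ ['/'] := by
          rw [List.take_add_one, hv.2]
          simp
        rw [← hk] at this
        calc k.toList ++ ['/'] = prim.toList.take (k.toList.length + 1) := this.symm
          _ <+: prim.toList := List.take_prefix _ _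
      simp only [pvMatchA, Bool.or_eq_true, beq_iff_eq, PySem.Str.startswith_eq]
      right
      apply (PySem.Chars.startswith_iff _ _).mpr
      simpa using hpre

-- a valid cut with its prefix in the dict gives membership in B's index list
theorem pvValid_mem_I (prim : String) (n : Nat) (hv : pvValid prim.toList n) :
    (n : Int) ∈ (PySem.Str.len prim :: (pvCuts prim.toList).reverse) :=
  (pvMem_I prim _).mpr ⟨n, rfl, hv⟩

theorem pvValid_le (cs : List Char) (n : Nat) (hv : pvValid cs n) : n ≤ cs.length := by
  rcases hv with h | h
  · exact le_of_eq h
  · exact le_of_lt h.1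

-- ===== VERDICT (by name: the statement is the Claim_ definition above) =====

theorem remap_internal_reference_path_spec : Claim_equal_remap_internal_reference_path := by
  intro prim m _
  unfold Spec_remap_internal_reference_path
  have hBeq : remap_internal_reference_path_alt prim m
      = pvGoB prim m (PySem.Str.len prim :: (pvCuts prim.toList).reverse) := rfl
  have hAeq : remap_internal_reference_path prim m
      = pvGoA prim m (PySem.List.sorted (PySem.List.dedup (m.map Prod.fst))
          (fun k => PySem.Str.len k) true) := rfl
  rw [hAeq, hBeq, pvGoA_eq_find, pvGoB_eq_find]
  have hIdesc := pvI_desc prim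
  set L := PySem.List.sorted (PySem.List.dedup (m.map Prod.fst)) (fun k => PySem.Str.len k) true with hL
  set I := PySem.Str.len prim :: (pvCuts prim.toList).reverse with hI
  -- keys in the dict
  have hmemL : ∀ k : String, k ∈ L ↔ pvDHas m k = true := by
    intro k
    rw [hL, PySem.List.mem_sorted, PySem.List.mem_dedup, pvDHas_iff]
  cases hfB : I.find? (pvTestB prim m) with
  | none =>
    have hfA : L.find? (pvMatchA prim) = none := by
      rw [List.find?_eq_none]
      intro k hk hmk
      obtain ⟨hk1, hk2⟩ := (pvMatchA_iff prim k).mp hmk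
      have hkd : pvDHas m k = true := (hmemL k).mp hk
      have hpe : PySem.Str.slice prim none (some (k.toList.length : Int)) = k := by
        apply String.toList_inj.mp
        rw [pvPrefS_toList]
        exact hk1.symm
      have htB : pvTestB prim m (k.toList.length : Int) = true := by
        rw [pvTestB, hpe]; exact hkd
      have hmem := pvValid_mem_I prim k.toList.length hk2
      rw [← hI] at hmem
      exact (List.find?_eq_none.mp hfB _ hmem) htB
    rw [hfA]
  | some i =>
    obtain ⟨n, hin, hv⟩ := (pvMem_I prim i).mp (by rw [hI] at hfB; exact List.mem_of_find?_eq_some hfB)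
    subst hin
    have hnN : n ≤ prim.toList.length := pvValid_le _ _ hv
    set kst := PySem.Str.slice prim none (some (n : Int)) with hkst
    have hkstL : kst.toList = prim.toList.take n := pvPrefS_toList prim n
    have hkstlen : kst.toList.length = n := by
      rw [hkstL, List.length_take]; omega
    have hkd : pvDHas m kst = true := by
      have := List.find?_some hfB
      rw [pvTestB] at this
      rw [hkst]
      exact this
    have hfA : L.find? (pvMatchA prim) = some kst := by
      apply pvFind_sorted_eq
      · rw [hL]; exact PySem.List.sorted_pairwise_rev _ _
      · exact (hmemL kst).mpr hkd
      · apply (pvMatchA_iff prim kst).mpr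
        rw [hkstlen, hkstL]
        exact ⟨rfl, hv⟩
      · intro y hy hmy
        obtain ⟨hy1, hy2⟩ := (pvMatchA_iff prim y).mp hmy
        have hpe : PySem.Str.slice prim none (some (y.toList.length : Int)) = y := by
          apply String.toList_inj.mp
          rw [pvPrefS_toList]
          exact hy1.symm
        have htB : pvTestB prim m (y.toList.length : Int) = true := by
          rw [pvTestB, hpe]
          exact (hmemL y).mp hy
        have hmem := pvValid_mem_I prim y.toList.length hy2
        rw [← hI] at hmem
        have := pvFind_desc_max hIdesc hfB _ hmem htB
        rw [PySem.Str.len_eq, PySem.Str.len_eq, hkstlen]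
        exact_mod_cast this
      · intro y hy hmy hlen
        obtain ⟨hy1, _⟩ := (pvMatchA_iff prim y).mp hmy
        have hyl : y.toList.length = n := by
          rw [PySem.Str.len_eq, PySem.Str.len_eq, hkstlen] at hlen
          exact_mod_cast hlen
        apply String.toList_inj.mp
        rw [hy1, hyl, ← hkstL]
    rw [hfA]
    simp only
    have hlen_kst : PySem.Str.len kst = (n : Int) := by
      rw [PySem.Str.len_eq, hkstlen]
    by_cases hp : prim = kst
    · rw [if_pos hp]
      have hnN' : n = prim.toList.length := by
        have := congrArg (fun s => s.toList.length) hp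
        simp only at this
        rw [hkstlen] at this
        omega
      have hsuf : (PySem.Str.slice prim (some (n : Int)) none) = "" := by
        apply String.toList_inj.mp
        rw [pvSuffS_toList, hnN']
        simp
      rw [hsuf, ← hkst]
      apply String.toList_inj.mp
      simp
    · rw [if_neg hp, hlen_kst]
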